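-- pv_equiv track=rewrite | github.com/whyj107/Algorithm | CodeWar/20200820_Simple Sentences.py | make_sentences
-- ===== SOURCE A (Python) =====
-- def make_sentences(parts):
--     l = []
--     pre = ''
--     for i in parts[::-1]:
--         if i.isalpha() or i.isdigit():
--             if not (pre.isalpha() or pre.isdigit()):
--                 l.append(i+pre)
--             else:
--                 l.append(i)
--         else:
--             if pre == i:
--                 continue
--         pre = i
--     answer = ' '.join(l[::-1])
--     return answer if answer[-1] == '.' else answer+'.'
-- ===== SOURCE B (Python) =====
-- def make_sentences(parts):
--     words = []
--     for idx, p in enumerate(parts):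
--         if p.isalpha() or p.isdigit():
--             nxt = parts[idx + 1] if idx + 1 < len(parts) else ''
--             words.append(p if nxt.isalpha() or nxt.isdigit() else p + nxt)
--     answer = ' '.join(words)
--     return answer if answer[-1] == '.' else answer + '.'
-- ===== Notes on version B (the rewrite author's own statement) =====
-- stated objective: simpler
-- what changed: Single forward pass with index lookahead (parts[idx+1]) replacing A's double reversal ([::-1] twice) and look-behind 'pre' accumulator; the dead 'pre == i: continue' branch disappears.
import Mathlib
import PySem

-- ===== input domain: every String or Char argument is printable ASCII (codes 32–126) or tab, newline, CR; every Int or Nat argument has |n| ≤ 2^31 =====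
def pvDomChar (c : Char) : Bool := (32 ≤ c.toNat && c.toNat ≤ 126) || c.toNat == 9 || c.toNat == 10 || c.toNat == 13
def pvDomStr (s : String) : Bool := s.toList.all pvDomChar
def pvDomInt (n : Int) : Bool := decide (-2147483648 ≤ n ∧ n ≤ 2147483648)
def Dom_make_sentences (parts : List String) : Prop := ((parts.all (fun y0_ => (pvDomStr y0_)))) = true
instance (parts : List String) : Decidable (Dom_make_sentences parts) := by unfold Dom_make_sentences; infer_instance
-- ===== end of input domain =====

-- B replaces A's double reversal + look-behind accumulator by one forward pass with index lookahead (simpler; return value only).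

-- ===== PORT A =====
def make_sentences (parts : List String) : String :=
  let st := ((PySem.List.slice? parts none none (-1)).getD []).foldl
    (fun (st : List String × String) i =>
      if PySem.Str.strIsalpha i || PySem.Str.strIsdigit i then
        if !(PySem.Str.strIsalpha st.2 || PySem.Str.strIsdigit st.2) then
          (st.1 ++ [i ++ st.2], i)
        else
          (st.1 ++ [i], i)
      else
        if st.2 == i then st else (st.1, i))
    ([], "")
  let answer := PySem.Str.join " " ((PySem.List.slice? st.1 none none (-1)).getD [])
  if PySem.Str.pyGet? answer (-1) = some '.' then answer else answer ++ "."
  -- answer[-1] = none means Python raises IndexError; excluded by Pre_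

-- ===== PORT B =====
def make_sentences_alt (parts : List String) : String :=
  let words := (PySem.List.enumerate parts).foldl
    (fun (ws : List String) ip =>
      if PySem.Str.strIsalpha ip.2 || PySem.Str.strIsdigit ip.2 then
        let nxt := if ip.1 + 1 < (parts.length : Int) then PySem.List.pyGetD parts (ip.1 + 1) "" else ""
        ws ++ [if PySem.Str.strIsalpha nxt || PySem.Str.strIsdigit nxt then ip.2 else ip.2 ++ nxt]
      else ws)
    []
  let answer := PySem.Str.join " " words
  if PySem.Str.pyGet? answer (-1) = some '.' then answer else answer ++ "."

-- ===== PRECONDITION & SPEC =====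
-- Pre_ excludes exactly the inputs with no purely-alphabetic or purely-digit part:
-- there the joined answer is empty and Python's answer[-1] raises IndexError (in A and in B alike).
def Pre_make_sentences (parts : List String) : Prop :=
  (parts.any (fun p => PySem.Str.strIsalpha p || PySem.Str.strIsdigit p)) = true
instance (parts : List String) : Decidable (Pre_make_sentences parts) := by
  unfold Pre_make_sentences; infer_instance
def pvWitness_make_sentences : List String := ["Hello", ",", "world", "!"]

def Spec_make_sentences (parts : List String) (out : String) : Prop := out = make_sentences_alt parts
instance (parts : List String) (out : String) : Decidable (Spec_make_sentences parts out) := by unfold Spec_make_sentences; infer_instance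

-- ===== CLAIM (what is proved, stated in full; the proofs are below) =====
def Claim_equal_make_sentences : Prop := ∀ (parts : List String), Dom_make_sentences parts → Pre_make_sentences parts → Spec_make_sentences parts (make_sentences parts)

-- ===== LEMMAS AND PROOFS =====

-- A's loop step (over reversed parts, with look-behind state (l, pre))
def pvStepA (st : List String × String) (i : String) : List String × String :=
  if PySem.Str.strIsalpha i || PySem.Str.strIsdigit i then
    if !(PySem.Str.strIsalpha st.2 || PySem.Str.strIsdigit st.2) then
      (st.1 ++ [i ++ st.2], i)
    else
      (st.1 ++ [i], i)
  else
    if st.2 == i then st else (st.1, i)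

-- forward specification of the collected words
def pvW : List String → List String
  | [] => []
  | p :: rest =>
      (if PySem.Str.strIsalpha p || PySem.Str.strIsdigit p then
        [if PySem.Str.strIsalpha (rest.headD "") || PySem.Str.strIsdigit (rest.headD "") then p
         else p ++ rest.headD ""]
      else []) ++ pvW rest

theorem pvFoldrA_snd (xs : List String) :
    (List.foldr (fun i st => pvStepA st i) (([], "") : List String × String) xs).2 = xs.headD "" := by
  cases xs with
  | nil => rfl
  | cons p rest =>
      simp only [List.foldr, pvStepA, List.headD]
      split_ifs with h1 h2 h3
      · rfl
      · rfl
      · exact eq_of_beq h3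
      · rfl

theorem pvFoldrA_fst (xs : List String) :
    (List.foldr (fun i st => pvStepA st i) (([], "") : List String × String) xs).1 = (pvW xs).reverse := by
  induction xs with
  | nil => rfl
  | cons p rest ih =>
      have h2 := pvFoldrA_snd rest
      rw [List.foldr_cons]
      generalize hs : List.foldr (fun i st => pvStepA st i) (([], "") : List String × String) rest = s at ih h2
      obtain ⟨l, pre⟩ := s
      simp only at ih h2
      subst h2
      by_cases hp : (PySem.Str.strIsalpha p || PySem.Str.strIsdigit p) = true <;>
        by_cases hc : (PySem.Str.strIsalpha (rest.headD "") || PySem.Str.strIsdigit (rest.headD "")) = true <;>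
        simp [pvStepA, pvW, ih] <;> (try split_ifs) <;> simp_all

theorem pvNext (pre : List String) (p : String) (rest : List String) :
    (if (((pre ++ [p]).length : Nat) : Int) < (((pre ++ [p] ++ rest).length : Nat) : Int) then
        PySem.List.pyGetD (pre ++ [p] ++ rest) (((pre ++ [p]).length : Nat) : Int) "" else "")
      = rest.headD "" := by
  cases rest with
  | nil => simp
  | cons q qs =>
      have hlt : (((pre ++ [p]).length : Nat) : Int) < (((pre ++ [p] ++ q :: qs).length : Nat) : Int) := by
        simp
      rw [if_pos hlt, PySem.List.pyGetD_natCast, List.getD_eq_getElem?_getD]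
      have : (pre ++ [p] ++ q :: qs)[(pre ++ [p]).length]? = some q := by
        rw [show (pre ++ [p]).length = (pre ++ [p]).length + 0 by simp]
        rw [List.getElem?_append_right (by simp)]
        simp
      rw [this]; rfl

theorem pvFoldB_gen (suf pre acc : List String) :
    (PySem.List.enumerate suf (pre.length : Int)).foldl
      (fun (ws : List String) ip =>
        if PySem.Str.strIsalpha ip.2 || PySem.Str.strIsdigit ip.2 then
          let nxt := if ip.1 + 1 < (((pre ++ suf).length : Nat) : Int) then
              PySem.List.pyGetD (pre ++ suf) (ip.1 + 1) "" else ""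
          ws ++ [if PySem.Str.strIsalpha nxt || PySem.Str.strIsdigit nxt then ip.2 else ip.2 ++ nxt]
        else ws)
      acc = acc ++ pvW suf := by
  induction suf generalizing pre acc with
  | nil => simp [PySem.List.enumerate_nil, pvW]
  | cons p rest ih =>
      have hcast : pre ++ p :: rest = pre ++ [p] ++ rest := by simp
      rw [hcast, PySem.List.enumerate_cons, List.foldl_cons]
      have hlen : ((pre.length : Int)) + 1 = (((pre ++ [p]).length : Nat) : Int) := by
        simp
      rw [hlen, ih (pre ++ [p])]
      simp only [pvW, pvNext pre p rest]
      split_ifs <;> simp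

theorem pvWordsEq (parts : List String) :
    make_sentences parts = make_sentences_alt parts := by
  unfold make_sentences make_sentences_alt
  rw [PySem.List.slice?_none_none_neg_one]
  simp only [Option.getD_some]
  rw [show (fun (st : List String × String) i =>
        if PySem.Str.strIsalpha i || PySem.Str.strIsdigit i then
          if !(PySem.Str.strIsalpha st.2 || PySem.Str.strIsdigit st.2) then
            (st.1 ++ [i ++ st.2], i)
          else (st.1 ++ [i], i)
        else if st.2 == i then st else (st.1, i)) = (fun st i => pvStepA st i) from rfl]
  rw [List.foldl_reverse]
  rw [pvFoldrA_fst, PySem.List.slice?_none_none_neg_one]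
  have hB := pvFoldB_gen parts [] []
  simp only [List.length_nil, List.nil_append, Int.natCast_zero] at hB
  rw [hB]
  simp

-- ===== VERDICT (by name: the statement is the Claim_ definition above) =====
theorem make_sentences_spec : Claim_equal_make_sentences := by
  intro parts _ _
  unfold Spec_make_sentences
  exact pvWordsEq parts
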